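-- pv_equiv track=rewrite | github.com/ustankie/ASD | offline/zad8/zad8_fr.py | sum_stains
-- ===== SOURCE A (Python) =====
-- from collections import deque
--
-- def sum_stains(T):
--     n = len(T)
--     m = len(T[0])
--     S = [0 for _ in range(m)]
--     move = [(-1, 0), (1, 0), (0, 1), (0, -1)]
--     Q = deque()
--     for i in range(m):
--         if T[0][i]:
--             Q.append((0, i))
--             S[i] += T[0][i]
--             T[0][i] = 0
--             while len(Q) > 0:
--                 u, v = Q.popleft()
--                 for um, vm in move:
--                     a = u+um
--                     b = v+vm
--                     if a >= 0 and a < n and b >= 0 and b < m and T[a][b]: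
--                         S[i] += T[a][b]
--                         T[a][b] = 0
--                         Q.append((a, b))
--     return S
-- ===== SOURCE B (Python) =====
-- def sum_stains(T):
--     n = len(T)
--     m = len(T[0])
--     def fill(i):
--         total = 0
--         stack = [(0, i)]
--         while stack:
--             a, b = stack.pop()
--             if 0 <= a < n and 0 <= b < m and T[a][b]:
--                 total += T[a][b]
--                 T[a][b] = 0
--                 stack += [(a - 1, b), (a + 1, b), (a, b + 1), (a, b - 1)]
--         return total
--     return [fill(i) for i in range(m)]
-- ===== Notes on version B (the rewrite author's own statement) =====
-- stated objective: alternative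
-- what changed: Replaces the deque BFS that marks cells on enqueue (zeroing and summing a cell when it is first seen as a neighbour, with S preallocated and updated by index) by a LIFO-stack depth-first fill that tests and marks cells on pop (cells may sit on the stack several times; a dead pop is skipped), seeds every column uniformly with fill(0,i) with no top-row branch, and builds the result with a comprehension.
-- outside the precondition, e.g. on sum_stains([[0, 0], [5]]): A returns [0, 0], B returns [0, 0]
import Mathlib
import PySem

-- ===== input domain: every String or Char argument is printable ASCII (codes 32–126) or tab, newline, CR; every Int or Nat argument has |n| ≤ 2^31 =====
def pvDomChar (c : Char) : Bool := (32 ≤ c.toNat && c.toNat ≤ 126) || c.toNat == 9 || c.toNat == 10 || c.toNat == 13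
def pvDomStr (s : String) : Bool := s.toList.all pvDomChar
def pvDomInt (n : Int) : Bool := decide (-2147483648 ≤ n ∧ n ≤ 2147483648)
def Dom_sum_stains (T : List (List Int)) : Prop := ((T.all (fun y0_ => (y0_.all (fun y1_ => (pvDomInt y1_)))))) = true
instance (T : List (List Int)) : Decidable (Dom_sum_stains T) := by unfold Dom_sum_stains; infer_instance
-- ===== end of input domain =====

-- B replaces A's deque BFS (mark-on-enqueue, S updated by index) by a LIFO-stack
-- depth-first fill that tests and marks cells on pop and builds the result list with a
-- comprehension; both mutate T identically in Python (the same cells end up zeroed), and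
-- the proved equivalence is about the returned list.

-- ===== PORT A =====
-- shared grid primitives: T[a][b] read (after the bounds check) and T[a][b] = 0
def getC (g : List (List Int)) (a b : Int) : Int := (g.getD a.toNat []).getD b.toNat 0

def setZ (g : List (List Int)) (a b : Int) : List (List Int) :=
  g.set a.toNat ((g.getD a.toNat []).set b.toNat 0)

-- number of nonzero cells: termination measure for both flood loops
def rowCount (r : List Int) : Nat := (r.filter (fun x => x != 0)).length

def gCount (g : List (List Int)) : Nat := (g.map rowCount).sum

theorem rowCount_set0 (r : List Int) (k : Nat) (h : r.getD k 0 ≠ 0) :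
    rowCount (r.set k 0) + 1 = rowCount r := by
  induction r generalizing k with
  | nil => simp [List.getD] at h
  | cons x t ih =>
    cases k with
    | zero =>
      have hx : x ≠ 0 := by simpa [List.getD] using h
      simp [rowCount, hx]
    | succ k =>
      have h' : t.getD k 0 ≠ 0 := by simpa [List.getD] using h
      have ht := ih k h'
      show rowCount (x :: t.set k 0) + 1 = rowCount (x :: t)
      simp only [rowCount, List.filter_cons] at ht ⊢
      split <;> (first | (simp only [List.length_cons]; omega) | omega)

theorem gCount_set0 (g : List (List Int)) (j k : Nat)
    (h : (g.getD j []).getD k 0 ≠ 0) :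
    gCount (g.set j ((g.getD j []).set k 0)) + 1 = gCount g := by
  induction g generalizing j with
  | nil => simp [List.getD] at h
  | cons r t ih =>
    cases j with
    | zero =>
      have := rowCount_set0 r k (by simpa [List.getD] using h)
      simp [gCount, List.getD] at *
      omega
    | succ j =>
      have := ih j (by simpa [List.getD] using h)
      simp [gCount, List.getD] at *
      omega

theorem gCount_setZ (g : List (List Int)) (a b : Int) (h : getC g a b ≠ 0) :
    gCount (setZ g a b) + 1 = gCount g := by
  have := gCount_set0 g a.toNat b.toNat (by simpa [getC] using h)
  simpa [setZ] using this

def movesA : List (Int × Int) := [(-1, 0), (1, 0), (0, 1), (0, -1)]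

-- body of A's inner `for um, vm in move` loop
def visitA (n m : Int) (i : Nat) (st : List (List Int) × List Int × List (Int × Int))
    (c : Int × Int) : List (List Int) × List Int × List (Int × Int) :=
  if 0 ≤ c.1 ∧ c.1 < n ∧ 0 ≤ c.2 ∧ c.2 < m ∧ getC st.1 c.1 c.2 ≠ 0 then
    (setZ st.1 c.1 c.2, st.2.1.set i (st.2.1.getD i 0 + getC st.1 c.1 c.2), st.2.2 ++ [c])
  else st

theorem visitA_measure (n m : Int) (i : Nat) (st : List (List Int) × List Int × List (Int × Int))
    (c : Int × Int) :
    gCount (visitA n m i st c).1 + (visitA n m i st c).2.2.length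
      = gCount st.1 + st.2.2.length := by
  unfold visitA
  split
  · next h => have := gCount_setZ st.1 c.1 c.2 h.2.2.2.2; simp; omega
  · rfl

theorem foldl_visitA_measure (n m : Int) (i : Nat) (u v : Int) (l : List (Int × Int))
    (st : List (List Int) × List Int × List (Int × Int)) :
    gCount (List.foldl (fun st mv => visitA n m i st (u + mv.1, v + mv.2)) st l).1
      + (List.foldl (fun st mv => visitA n m i st (u + mv.1, v + mv.2)) st l).2.2.length
      = gCount st.1 + st.2.2.length := by
  induction l generalizing st with
  | nil => rfl
  | cons x l ih =>
    simp only [List.foldl_cons]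
    rw [ih]
    exact visitA_measure n m i st (u + x.1, v + x.2)

-- A's `while len(Q) > 0` loop
def bfsA (n m : Int) (i : Nat) (g : List (List Int)) (S : List Int)
    (Q : List (Int × Int)) : List (List Int) × List Int :=
  match Q with
  | [] => (g, S)
  | (u, v) :: rest =>
    let st := movesA.foldl (fun st mv => visitA n m i st (u + mv.1, v + mv.2)) (g, S, rest)
    bfsA n m i st.1 st.2.1 st.2.2
termination_by gCount g + Q.length
decreasing_by
  have h := foldl_visitA_measure n m i u v movesA (g, S, rest)
  dsimp only at h
  simp only [List.length_cons]
  omega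

-- body of A's `for i in range(m)` loop
def aLoopBody (n m : Int) (st : List (List Int) × List Int) (i : Nat) :
    List (List Int) × List Int :=
  if getC st.1 0 (i : Int) ≠ 0 then
    bfsA n m i (setZ st.1 0 (i : Int))
      (st.2.set i (st.2.getD i 0 + getC st.1 0 (i : Int))) [((0 : Int), (i : Int))]
  else st

def sum_stains (T : List (List Int)) : List Int :=
  ((List.range (T.getD 0 []).length).foldl
      (aLoopBody (T.length : Int) ((T.getD 0 []).length : Int))
      (T, List.replicate (T.getD 0 []).length 0)).2

-- ===== PORT B =====
-- B's `while stack` loop; Python keeps the stack's top at the END of the list, the port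
-- keeps the top at the HEAD, so Python's `stack += [(a-1,b),(a+1,b),(a,b+1),(a,b-1)]`
-- becomes consing the same four cells in reverse order.
def dfsB (n m : Int) (g : List (List Int)) (total : Int) (stack : List (Int × Int)) :
    Int × List (List Int) :=
  match stack with
  | [] => (total, g)
  | (a, b) :: rest =>
    if 0 ≤ a ∧ a < n ∧ 0 ≤ b ∧ b < m ∧ getC g a b ≠ 0 then
      dfsB n m (setZ g a b) (total + getC g a b)
        ((a, b - 1) :: (a, b + 1) :: (a + 1, b) :: (a - 1, b) :: rest)
    else dfsB n m g total rest
termination_by 5 * gCount g + stack.length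
decreasing_by
  · rename_i h
    have := gCount_setZ g a b h.2.2.2.2
    simp only [List.length_cons]
    omega
  · simp only [List.length_cons]
    omega

-- body of B's `[fill(i) for i in range(m)]` comprehension (T threads through fill)
def bLoopBody (n m : Int) (st : List (List Int) × List Int) (i : Nat) :
    List (List Int) × List Int :=
  let r := dfsB n m st.1 0 [((0 : Int), (i : Int))]
  (r.2, st.2 ++ [r.1])

def sum_stains_alt (T : List (List Int)) : List Int :=
  ((List.range (T.getD 0 []).length).foldl
      (bLoopBody (T.length : Int) ((T.getD 0 []).length : Int))
      (T, ([] : List Int))).2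

-- ===== PRECONDITION & SPEC =====
-- Pre_ excludes the empty grid (A raises IndexError on len(T[0])) and grids in which some
-- row is shorter than row 0: on those A raises IndexError whenever the flood reaches such a
-- row, and where the flood never reaches it both programs return the same list of sums.
def Pre_sum_stains (T : List (List Int)) : Prop :=
  T ≠ [] ∧ ∀ r ∈ T, (T.headD []).length ≤ r.length

instance (T : List (List Int)) : Decidable (Pre_sum_stains T) := by
  unfold Pre_sum_stains; infer_instance

def pvWitness_sum_stains : List (List Int) := [[1, 0], [0, 2]]

def Spec_sum_stains (T : List (List Int)) (out : List Int) : Prop := out = sum_stains_alt T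
instance (T : List (List Int)) (out : List Int) : Decidable (Spec_sum_stains T out) := by
  unfold Spec_sum_stains; infer_instance

-- ===== CLAIM (what is proved, stated in full; the proofs are below) =====
def Claim_equal_sum_stains : Prop :=
  ∀ (T : List (List Int)), Dom_sum_stains T → Pre_sum_stains T →
    Spec_sum_stains T (sum_stains T)

-- ===== LEMMAS AND PROOFS =====

-- the liveness test both flood loops perform on a cell
def liveP (n m : Int) (g : List (List Int)) (c : Int × Int) : Prop :=
  0 ≤ c.1 ∧ c.1 < n ∧ 0 ≤ c.2 ∧ c.2 < m ∧ getC g c.1 c.2 ≠ 0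

-- neighbour lists: A's enqueue order, and B's pop order (its reverse)
def nbrsA (c : Int × Int) : List (Int × Int) :=
  [(c.1 - 1, c.2), (c.1 + 1, c.2), (c.1, c.2 + 1), (c.1, c.2 - 1)]

def nbrsB (c : Int × Int) : List (Int × Int) :=
  [(c.1, c.2 - 1), (c.1, c.2 + 1), (c.1 + 1, c.2), (c.1 - 1, c.2)]

theorem nbrsB_perm (c : Int × Int) : (nbrsB c).Perm (nbrsA c) := by
  have h : nbrsB c = (nbrsA c).reverse := rfl
  rw [h]; exact List.reverse_perm (nbrsA c)

-- proof-side canonical flood machine: pop from the front, test-and-mark on pop,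
-- push the popped cell's neighbours on the front (B's discipline, compositional sum)
def procD (n m : Int) (g : List (List Int)) (W : List (Int × Int)) :
    Int × List (List Int) :=
  match W with
  | [] => (0, g)
  | c :: rest =>
    if 0 ≤ c.1 ∧ c.1 < n ∧ 0 ≤ c.2 ∧ c.2 < m ∧ getC g c.1 c.2 ≠ 0 then
      let r := procD n m (setZ g c.1 c.2) (nbrsB c ++ rest)
      (getC g c.1 c.2 + r.1, r.2)
    else procD n m g rest
termination_by 5 * gCount g + W.length
decreasing_by
  · rename_i h
    have := gCount_setZ g c.1 c.2 h.2.2.2.2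
    simp only [List.length_append, List.length_cons, nbrsB, List.length]
    omega
  · simp only [List.length_cons]
    omega

theorem procD_nil (n m : Int) (g : List (List Int)) : procD n m g [] = (0, g) := by
  rw [procD]

theorem procD_live (n m : Int) (g : List (List Int)) (c : Int × Int)
    (rest : List (Int × Int)) (h : liveP n m g c) :
    procD n m g (c :: rest)
      = (getC g c.1 c.2 + (procD n m (setZ g c.1 c.2) (nbrsB c ++ rest)).1,
         (procD n m (setZ g c.1 c.2) (nbrsB c ++ rest)).2) := by
  rw [procD]
  exact if_pos h

theorem procD_dead (n m : Int) (g : List (List Int)) (c : Int × Int)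
    (rest : List (Int × Int)) (h : ¬ liveP n m g c) :
    procD n m g (c :: rest) = procD n m g rest := by
  rw [procD]
  exact if_neg h

-- ---- pointwise facts about getC / setZ ----

theorem getD_set {α : Type} (l : List α) (i j : Nat) (x d : α) :
    (l.set i x).getD j d = if i = j ∧ j < l.length then x else l.getD j d := by
  induction l generalizing i j with
  | nil => simp
  | cons a t ih =>
    cases i with
    | zero => cases j with
      | zero => simp
      | succ j => simp [List.getD]
    | succ i => cases j with
      | zero => simp [List.getD]
      | succ j =>
        simp only [List.set_cons_succ, List.getD_cons_succ, ih, List.length_cons]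
        by_cases h : i = j ∧ j < t.length
        · rw [if_pos h, if_pos ⟨by omega, by omega⟩]
        · rw [if_neg h, if_neg (by omega)]

theorem getD_out {α : Type} (l : List α) (j : Nat) (d : α) (h : l.length ≤ j) :
    l.getD j d = d := by
  induction l generalizing j with
  | nil => simp
  | cons a t ih =>
    cases j with
    | zero => simp at h
    | succ j => simp only [List.getD_cons_succ]; exact ih j (by simpa using h)

theorem getC_setZ (g : List (List Int)) (a b a' b' : Int) :
    getC (setZ g a b) a' b'
      = if a.toNat = a'.toNat ∧ b.toNat = b'.toNat then 0 else getC g a' b' := by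
  unfold getC setZ
  rw [getD_set]
  by_cases h1 : a.toNat = a'.toNat ∧ a'.toNat < g.length
  · rw [if_pos h1, getD_set]
    by_cases h2 : b.toNat = b'.toNat ∧ b'.toNat < (g.getD a.toNat []).length
    · rw [if_pos h2, if_pos ⟨h1.1, h2.1⟩]
    · rw [if_neg h2]
      by_cases h3 : a.toNat = a'.toNat ∧ b.toNat = b'.toNat
      · rw [if_pos h3]
        have : (g.getD a.toNat []).length ≤ b'.toNat := by
          rcases h3 with ⟨_, hb⟩
          by_contra hh
          exact h2 ⟨hb, by omega⟩
        rw [h1.1, getD_out _ _ _ (by rw [← h1.1]; exact this)]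
      · rw [if_neg h3, h1.1]
  · rw [if_neg h1]
    by_cases h3 : a.toNat = a'.toNat ∧ b.toNat = b'.toNat
    · rw [if_pos h3]
      have hlen : g.length ≤ a'.toNat := by
        by_contra hh
        exact h1 ⟨h3.1, by omega⟩
      rw [getD_out g a'.toNat [] hlen]
      simp
    · rw [if_neg h3]

theorem setZ_length (g : List (List Int)) (a b : Int) : (setZ g a b).length = g.length := by
  simp [setZ]

theorem setZ_comm (g : List (List Int)) (a b a' b' : Int)
    (h : ¬ (a.toNat = a'.toNat ∧ b.toNat = b'.toNat)) :
    setZ (setZ g a b) a' b' = setZ (setZ g a' b') a b := by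
  unfold setZ
  by_cases hi : a.toNat = a'.toNat
  · -- same row, different column
    have hb : b.toNat ≠ b'.toNat := fun hb => h ⟨hi, hb⟩
    rw [hi]
    by_cases hr : a'.toNat < g.length
    · rw [getD_set, if_pos ⟨rfl, hr⟩, getD_set, if_pos ⟨rfl, hr⟩]
      rw [List.set_set, List.set_set, List.set_comm _ _ hb]
    · have hg1 : g.set a'.toNat ((g.getD a'.toNat []).set b.toNat 0) = g :=
        List.set_eq_of_length_le (by omega)
      have hg2 : g.set a'.toNat ((g.getD a'.toNat []).set b'.toNat 0) = g :=
        List.set_eq_of_length_le (by omega)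
      simp only [hg1, hg2]
  · -- different rows
    rw [getD_set, if_neg (by omega), getD_set, if_neg (by omega)]
    exact List.set_comm _ _ (by omega)

-- liveness of another cell is unchanged by zeroing a distinct cell, and a dead cell stays dead
theorem live_setZ_of_ne (n m : Int) (g : List (List Int)) (a b : Int) (c : Int × Int)
    (h : ¬ (a.toNat = c.1.toNat ∧ b.toNat = c.2.toNat)) :
    getC (setZ g a b) c.1 c.2 = getC g c.1 c.2 := by
  rw [getC_setZ, if_neg h]

theorem dead_setZ (n m : Int) (g : List (List Int)) (a b : Int) (c : Int × Int)
    (h : ¬ liveP n m g c) : ¬ liveP n m (setZ g a b) c := by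
  intro hl
  apply h
  rcases hl with ⟨h1, h2, h3, h4, h5⟩
  refine ⟨h1, h2, h3, h4, ?_⟩
  rw [getC_setZ] at h5
  by_cases hd : a.toNat = c.1.toNat ∧ b.toNat = c.2.toNat
  · rw [if_pos hd] at h5; exact absurd rfl h5
  · rwa [if_neg hd] at h5

-- distinct in-bounds cells have distinct Nat coordinates
theorem live_ne_coords (n m : Int) (g g' : List (List Int)) (x c : Int × Int)
    (hx : liveP n m g x) (hc : liveP n m g' c) (hne : x ≠ c) :
    ¬ (x.1.toNat = c.1.toNat ∧ x.2.toNat = c.2.toNat) := by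
  rcases hx with ⟨hx1, _, hx2, _, _⟩
  rcases hc with ⟨hc1, _, hc2, _, _⟩
  rintro ⟨e1, e2⟩
  apply hne
  have e1' : x.1 = c.1 := by omega
  have e2' : x.2 = c.2 := by omega
  cases x; cases c; simp_all

-- ---- removing a dead cell from anywhere in the worklist ----

theorem drop_dead (n m : Int) : ∀ (N : Nat) (g : List (List Int)) (W1 : List (Int × Int))
    (c : Int × Int) (W2 : List (Int × Int)),
    5 * gCount g + (W1 ++ c :: W2).length ≤ N → ¬ liveP n m g c →
    procD n m g (W1 ++ c :: W2) = procD n m g (W1 ++ W2) := by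
  intro N
  induction N with
  | zero => intro g W1 c W2 hm _; simp [List.length_append] at hm
  | succ N ih =>
    intro g W1 c W2 hm hc
    match W1 with
    | [] => exact procD_dead n m g c W2 hc
    | h :: W1' =>
      by_cases hh : liveP n m g h
      · rw [List.cons_append, procD_live n m g h _ hh,
            List.cons_append, procD_live n m g h _ hh]
        have hcount := gCount_setZ g h.1 h.2 hh.2.2.2.2
        have e1 : nbrsB h ++ (W1' ++ c :: W2) = (nbrsB h ++ W1') ++ c :: W2 := by
          rw [List.append_assoc]
        have e2 : nbrsB h ++ (W1' ++ W2) = (nbrsB h ++ W1') ++ W2 := by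
          rw [List.append_assoc]
        rw [e1, e2, ih (setZ g h.1 h.2) (nbrsB h ++ W1') c W2
          (by simp only [List.length_append, List.length_cons, nbrsB, List.length] at hm ⊢
              omega)
          (dead_setZ n m g h.1 h.2 c hc)]
      · rw [List.cons_append, procD_dead n m g h _ hh,
            List.cons_append, procD_dead n m g h _ hh]
        exact ih g W1' c W2
          (by simp only [List.length_append, List.length_cons] at hm ⊢; omega) hc

-- ---- order-independence of the flood machine (permutation + extraction, mutually) ----

theorem procD_PE (n m : Int) : ∀ (N : Nat),
    (∀ (g : List (List Int)) (W1 W2 : List (Int × Int)), W1.Perm W2 →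
      5 * gCount g + W1.length ≤ N → procD n m g W1 = procD n m g W2)
    ∧ (∀ (g : List (List Int)) (W1 : List (Int × Int)) (c : Int × Int)
        (W2 : List (Int × Int)), liveP n m g c →
        5 * gCount g + (W1 ++ c :: W2).length ≤ N →
        procD n m g (W1 ++ c :: W2)
          = (getC g c.1 c.2 + (procD n m (setZ g c.1 c.2) (W1 ++ nbrsB c ++ W2)).1,
             (procD n m (setZ g c.1 c.2) (W1 ++ nbrsB c ++ W2)).2)) := by
  intro N
  induction N using Nat.strong_induction_on with
  | _ N ih =>
  constructor
  · -- permutation invariance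
    intro g W1 W2 hp
    induction hp with
    | nil => intro _; rfl
    | cons x hperm ihp =>
      intro hm
      rename_i l1 l2
      simp only [List.length_cons] at hm
      by_cases hx : liveP n m g x
      · rw [procD_live n m g x l1 hx, procD_live n m g x l2 hx]
        have hcount := gCount_setZ g x.1 x.2 hx.2.2.2.2
        have hrec := (ih (N - 1) (by omega)).1 (setZ g x.1 x.2)
          (nbrsB x ++ l1) (nbrsB x ++ l2) (hperm.append_left (nbrsB x))
          (by simp only [List.length_append, nbrsB, List.length]; omega)
        rw [hrec]
      · rw [procD_dead n m g x l1 hx, procD_dead n m g x l2 hx]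
        exact (ih (N - 1) (by omega)).1 g l1 l2 hperm (by omega)
    | swap x y l =>
      -- goal: procD g (y :: x :: l) = procD g (x :: y :: l)
      intro hm
      simp only [List.length_cons] at hm
      by_cases hy : liveP n m g y
      · by_cases hx : liveP n m g x
        · by_cases hxy : x = y
          · subst hxy; rfl
          · -- both live, distinct
            have hne := live_ne_coords n m g g y x hy hx (fun e => hxy e.symm)
            have hne' := live_ne_coords n m g g x y hx hy hxy
            have hcy := gCount_setZ g y.1 y.2 hy.2.2.2.2
            have hcx := gCount_setZ g x.1 x.2 hx.2.2.2.2
            have hxin : liveP n m (setZ g y.1 y.2) x := by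
              rcases hx with ⟨a1, a2, a3, a4, a5⟩
              exact ⟨a1, a2, a3, a4, by
                rw [live_setZ_of_ne n m g y.1 y.2 x hne]; exact a5⟩
            have hyin : liveP n m (setZ g x.1 x.2) y := by
              rcases hy with ⟨a1, a2, a3, a4, a5⟩
              exact ⟨a1, a2, a3, a4, by
                rw [live_setZ_of_ne n m g x.1 x.2 y hne']; exact a5⟩
            rw [procD_live n m g y _ hy, procD_live n m g x _ hx]
            have hcount2 := gCount_setZ (setZ g y.1 y.2) x.1 x.2 hxin.2.2.2.2
            have hE1 := (ih (N - 1) (by omega)).2 (setZ g y.1 y.2) (nbrsB y) x l hxin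
              (by simp only [List.length_append, List.length_cons, nbrsB, List.length]
                  omega)
            have hE2 := (ih (N - 1) (by omega)).2 (setZ g x.1 x.2) (nbrsB x) y l hyin
              (by have := gCount_setZ (setZ g x.1 x.2) y.1 y.2 hyin.2.2.2.2
                  simp only [List.length_append, List.length_cons, nbrsB, List.length]
                  omega)
            rw [hE1, hE2]
            have hgc : setZ (setZ g y.1 y.2) x.1 x.2 = setZ (setZ g x.1 x.2) y.1 y.2 :=
              setZ_comm g y.1 y.2 x.1 x.2 hne
            have hvx : getC (setZ g y.1 y.2) x.1 x.2 = getC g x.1 x.2 :=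
              live_setZ_of_ne n m g y.1 y.2 x hne
            have hvy : getC (setZ g x.1 x.2) y.1 y.2 = getC g y.1 y.2 :=
              live_setZ_of_ne n m g x.1 x.2 y hne'
            have hperm2 : (nbrsB y ++ nbrsB x ++ l).Perm (nbrsB x ++ nbrsB y ++ l) :=
              (List.perm_append_comm (l₁ := nbrsB y) (l₂ := nbrsB x)).append_right l
            have hP := (ih (N - 1) (by omega)).1 (setZ (setZ g y.1 y.2) x.1 x.2)
              (nbrsB y ++ nbrsB x ++ l) (nbrsB x ++ nbrsB y ++ l) hperm2
              (by simp only [List.length_append, nbrsB, List.length]; omega)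
            rw [hvx, hvy, hP, hgc]
            dsimp only
            congr 1
            ring
        · -- y live, x dead
          rw [procD_live n m g y _ hy, procD_dead n m g x _ hx,
              procD_live n m g y _ hy]
          have hxd : ¬ liveP n m (setZ g y.1 y.2) x := dead_setZ n m g y.1 y.2 x hx
          have hcy := gCount_setZ g y.1 y.2 hy.2.2.2.2
          have hdd := drop_dead n m (5 * gCount (setZ g y.1 y.2)
              + (nbrsB y ++ x :: l).length) (setZ g y.1 y.2) (nbrsB y) x l (le_refl _) hxd
          rw [hdd]
      · by_cases hx : liveP n m g x
        · -- y dead, x live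
          rw [procD_dead n m g y _ hy, procD_live n m g x _ hx,
              procD_live n m g x _ hx]
          have hyd : ¬ liveP n m (setZ g x.1 x.2) y := dead_setZ n m g x.1 x.2 y hy
          have hdd := drop_dead n m (5 * gCount (setZ g x.1 x.2)
              + (nbrsB x ++ y :: l).length) (setZ g x.1 x.2) (nbrsB x) y l (le_refl _) hyd
          rw [hdd]
        · rw [procD_dead n m g y _ hy, procD_dead n m g x _ hx,
              procD_dead n m g x _ hx, procD_dead n m g y _ hy]
    | trans h12 h23 ih12 ih23 =>
      intro hm
      rw [ih12 hm, ih23 (by rw [← h12.length_eq]; exact hm)]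
  · -- extraction of a live cell
    intro g W1 c W2 hc hm
    match W1 with
    | [] =>
      simp only [List.nil_append]
      exact procD_live n m g c W2 hc
    | h :: W1' =>
      simp only [List.length_append, List.length_cons] at hm
      by_cases hh : liveP n m g h
      · by_cases hhc : h = c
        · -- the same live cell occurs at the head: both occurrences collapse
          subst hhc
          rw [List.cons_append, procD_live n m g h _ hh]
          have hcount := gCount_setZ g h.1 h.2 hh.2.2.2.2
          have hdead : ¬ liveP n m (setZ g h.1 h.2) h := by
            intro hl
            have := hl.2.2.2.2
            rw [getC_setZ, if_pos ⟨rfl, rfl⟩] at this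
            exact this rfl
          have hdd := drop_dead n m (5 * gCount (setZ g h.1 h.2)
              + ((nbrsB h ++ W1') ++ h :: W2).length) (setZ g h.1 h.2)
              (nbrsB h ++ W1') h W2 (le_refl _) hdead
          rw [show nbrsB h ++ (W1' ++ h :: W2) = (nbrsB h ++ W1') ++ h :: W2 from by
                rw [List.append_assoc], hdd]
          -- RHS: head h of ((h :: W1') ++ nbrsB h) ++ W2 is dead after setZ
          have hperm : ((W1' ++ nbrsB h) ++ W2).Perm ((nbrsB h ++ W1') ++ W2) :=
            (List.perm_append_comm (l₁ := W1') (l₂ := nbrsB h)).append_right W2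
          have hR : procD n m (setZ g h.1 h.2) ((h :: W1' ++ nbrsB h) ++ W2)
              = procD n m (setZ g h.1 h.2) ((nbrsB h ++ W1') ++ W2) := by
            rw [List.cons_append, List.cons_append,
                procD_dead n m (setZ g h.1 h.2) h ((W1' ++ nbrsB h) ++ W2) hdead]
            exact (ih (N - 1) (by omega)).1 (setZ g h.1 h.2) _ _ hperm
              (by simp only [List.length_append, nbrsB, List.length]; omega)
          rw [hR]
        · -- distinct live head: process it on both sides, then extract deeper
          have hne := live_ne_coords n m g g h c hh hc hhc
          have hcount := gCount_setZ g h.1 h.2 hh.2.2.2.2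
          have hcin : liveP n m (setZ g h.1 h.2) c := by
            rcases hc with ⟨a1, a2, a3, a4, a5⟩
            exact ⟨a1, a2, a3, a4, by
              rw [live_setZ_of_ne n m g h.1 h.2 c hne]; exact a5⟩
          rw [List.cons_append, procD_live n m g h _ hh]
          have hE := (ih (N - 1) (by omega)).2 (setZ g h.1 h.2) (nbrsB h ++ W1') c W2 hcin
            (by simp only [List.length_append, List.length_cons, nbrsB, List.length]
                omega)
          rw [show nbrsB h ++ (W1' ++ c :: W2) = (nbrsB h ++ W1') ++ c :: W2 from by
                rw [List.append_assoc], hE]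
          -- RHS: same head processed under setZ at c
          have hhin : liveP n m (setZ g c.1 c.2) h := by
            rcases hh with ⟨a1, a2, a3, a4, a5⟩
            exact ⟨a1, a2, a3, a4, by
              rw [live_setZ_of_ne n m g c.1 c.2 h (by
                intro hcon; exact hne ⟨hcon.1.symm, hcon.2.symm⟩)]; exact a5⟩
          have hgc : setZ (setZ g h.1 h.2) c.1 c.2 = setZ (setZ g c.1 c.2) h.1 h.2 :=
            setZ_comm g h.1 h.2 c.1 c.2 (by
              intro hcon; exact hne ⟨hcon.1, hcon.2⟩)
          have hvc : getC (setZ g h.1 h.2) c.1 c.2 = getC g c.1 c.2 :=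
            live_setZ_of_ne n m g h.1 h.2 c hne
          have hvh : getC (setZ g c.1 c.2) h.1 h.2 = getC g h.1 h.2 :=
            live_setZ_of_ne n m g c.1 c.2 h (by
              intro hcon; exact hne ⟨hcon.1.symm, hcon.2.symm⟩)
          have hR : procD n m (setZ g c.1 c.2) (((h :: W1') ++ nbrsB c) ++ W2)
              = (getC g h.1 h.2
                  + (procD n m (setZ (setZ g h.1 h.2) c.1 c.2)
                      (((nbrsB h ++ W1') ++ nbrsB c) ++ W2)).1,
                 (procD n m (setZ (setZ g h.1 h.2) c.1 c.2)
                      (((nbrsB h ++ W1') ++ nbrsB c) ++ W2)).2) := by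
            rw [List.cons_append, List.cons_append,
                procD_live n m (setZ g c.1 c.2) h _ hhin, hvh, hgc]
            rw [show nbrsB h ++ (W1' ++ nbrsB c ++ W2)
                = ((nbrsB h ++ W1') ++ nbrsB c) ++ W2 from by
                  simp only [List.append_assoc]]
          rw [hvc, hR]
          dsimp only
          congr 1
          ring
      · -- dead head: skipped on both sides
        have hh' : ¬ liveP n m (setZ g c.1 c.2) h := dead_setZ n m g c.1 c.2 h hh
        simp only [List.cons_append]
        rw [procD_dead n m g h _ hh, procD_dead n m (setZ g c.1 c.2) h _ hh']
        exact (ih (N - 1) (by omega)).2 g W1' c W2 hc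
          (by simp only [List.length_append, List.length_cons]; omega)

theorem procD_perm (n m : Int) (g : List (List Int)) (W1 W2 : List (Int × Int))
    (h : W1.Perm W2) : procD n m g W1 = procD n m g W2 :=
  (procD_PE n m (5 * gCount g + W1.length)).1 g W1 W2 h (le_refl _)


-- ---- A's queue loop, reduced to the canonical machine ----

-- zero-on-touch step shared by A's loops, with a bare sum accumulator
def visitB (n m : Int) (st : List (List Int) × Int × List (Int × Int))
    (c : Int × Int) : List (List Int) × Int × List (Int × Int) :=
  if 0 ≤ c.1 ∧ c.1 < n ∧ 0 ≤ c.2 ∧ c.2 < m ∧ getC st.1 c.1 c.2 ≠ 0 then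
    (setZ st.1 c.1 c.2, st.2.1 + getC st.1 c.1 c.2, st.2.2 ++ [c])
  else st

theorem visitB_measure (n m : Int) (st : List (List Int) × Int × List (Int × Int))
    (c : Int × Int) :
    gCount (visitB n m st c).1 + (visitB n m st c).2.2.length
      = gCount st.1 + st.2.2.length := by
  unfold visitB
  split
  · next h => have := gCount_setZ st.1 c.1 c.2 h.2.2.2.2; simp; omega
  · rfl

theorem foldl_visitB_measure (n m : Int) (l : List (Int × Int))
    (st : List (List Int) × Int × List (Int × Int)) :
    gCount (List.foldl (visitB n m) st l).1 + (List.foldl (visitB n m) st l).2.2.length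
      = gCount st.1 + st.2.2.length := by
  induction l generalizing st with
  | nil => rfl
  | cons x l ih =>
    simp only [List.foldl_cons]
    rw [ih]
    exact visitB_measure n m st x

theorem foldl_visitB_measure' (n m u v : Int) (l : List (Int × Int))
    (st : List (List Int) × Int × List (Int × Int)) :
    gCount (List.foldl (fun st mv => visitB n m st (u + mv.1, v + mv.2)) st l).1
      + (List.foldl (fun st mv => visitB n m st (u + mv.1, v + mv.2)) st l).2.2.length
      = gCount st.1 + st.2.2.length := by
  induction l generalizing st with
  | nil => rfl
  | cons x l ih =>
    simp only [List.foldl_cons]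
    rw [ih]
    exact visitB_measure n m st (u + x.1, v + x.2)

-- proof-side form of A's queue loop with a bare sum accumulator
def bfsP (n m : Int) (g : List (List Int)) (Q : List (Int × Int)) :
    List (List Int) × Int :=
  match Q with
  | [] => (g, 0)
  | (u, v) :: rest =>
    let st := movesA.foldl (fun st mv => visitB n m st (u + mv.1, v + mv.2)) (g, 0, rest)
    let r := bfsP n m st.1 st.2.2
    (r.1, st.2.1 + r.2)
termination_by gCount g + Q.length
decreasing_by
  have h := foldl_visitB_measure' n m u v movesA (g, 0, rest)
  dsimp only at h
  simp only [List.length_cons]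
  omega

def addAt (S : List Int) (i : Nat) (v : Int) : List Int := S.set i (S.getD i 0 + v)

theorem set_getD_self (S : List Int) (i : Nat) : S.set i (S.getD i 0) = S := by
  induction S generalizing i with
  | nil => rfl
  | cons x t ih =>
    cases i with
    | zero => simp [List.getD]
    | succ n => simp only [List.getD_cons_succ, List.set_cons_succ, ih]

theorem addAt_zero (S : List Int) (i : Nat) : addAt S i 0 = S := by
  unfold addAt; rw [add_zero, set_getD_self]

theorem addAt_addAt (S : List Int) (i : Nat) (a b : Int) :
    addAt (addAt S i a) i b = addAt S i (a + b) := by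
  induction S generalizing i with
  | nil => simp [addAt]
  | cons x t ih =>
    cases i with
    | zero => simp [addAt, List.getD, add_assoc]
    | succ n =>
      simp only [addAt, List.getD_cons_succ, List.set_cons_succ] at *
      rw [ih]

theorem addAt_append_cons (S t : List Int) (y v : Int) :
    addAt (S ++ y :: t) S.length v = S ++ (y + v) :: t := by
  unfold addAt
  induction S with
  | nil => simp [List.getD]
  | cons x s ih => simp [List.getD]

-- generic shift lemma: a fold step that only adds to the sum and appends to the list
theorem foldl_shift (step : (List (List Int) × Int × List (Int × Int)) → (Int × Int) →
      (List (List Int) × Int × List (Int × Int)))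
    (hstep : ∀ (g : List (List Int)) (s0 s : Int) (nx0 nx : List (Int × Int)) (c : Int × Int),
      step (g, s0 + s, nx0 ++ nx) c
        = ((step (g, s, nx) c).1, s0 + (step (g, s, nx) c).2.1, nx0 ++ (step (g, s, nx) c).2.2))
    (l : List (Int × Int)) :
    ∀ (g : List (List Int)) (s : Int) (nx : List (Int × Int)),
      List.foldl step (g, s, nx) l
        = ((List.foldl step (g, 0, []) l).1,
           s + (List.foldl step (g, 0, []) l).2.1,
           nx ++ (List.foldl step (g, 0, []) l).2.2) := by
  induction l with
  | nil => intro g s nx; simp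
  | cons x l ih =>
    intro g s nx
    simp only [List.foldl_cons]
    rcases hx : step (g, 0, []) x with ⟨g1, s1, n1⟩
    have e : step (g, s, nx) x = (g1, s + s1, nx ++ n1) := by
      have h0 := hstep g s 0 nx [] x
      simpa [hx] using h0
    rw [e, ih g1 (s + s1) (nx ++ n1), ih g1 s1 n1]
    simp [add_assoc, List.append_assoc]

theorem visitB_hstep (n m : Int) (g : List (List Int)) (s0 s : Int)
    (nx0 nx : List (Int × Int)) (c : Int × Int) :
    visitB n m (g, s0 + s, nx0 ++ nx) c
      = ((visitB n m (g, s, nx) c).1, s0 + (visitB n m (g, s, nx) c).2.1,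
         nx0 ++ (visitB n m (g, s, nx) c).2.2) := by
  unfold visitB
  dsimp only
  split <;> simp [add_assoc]

theorem foldl_visitB_shift_mv (n m u v : Int) (l : List (Int × Int))
    (g : List (List Int)) (s : Int) (nx : List (Int × Int)) :
    List.foldl (fun st mv => visitB n m st (u + mv.1, v + mv.2)) (g, s, nx) l
      = ((List.foldl (fun st mv => visitB n m st (u + mv.1, v + mv.2)) (g, 0, []) l).1,
         s + (List.foldl (fun st mv => visitB n m st (u + mv.1, v + mv.2)) (g, 0, []) l).2.1,
         nx ++ (List.foldl (fun st mv => visitB n m st (u + mv.1, v + mv.2)) (g, 0, []) l).2.2) :=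
  foldl_shift _ (fun g s0 s nx0 nx c => visitB_hstep n m g s0 s nx0 nx (u + c.1, v + c.2)) l g s nx

theorem foldl_visitB_shift_id (n m : Int) (l : List (Int × Int))
    (g : List (List Int)) (s : Int) (nx : List (Int × Int)) :
    List.foldl (visitB n m) (g, s, nx) l
      = ((List.foldl (visitB n m) (g, 0, []) l).1,
         s + (List.foldl (visitB n m) (g, 0, []) l).2.1,
         nx ++ (List.foldl (visitB n m) (g, 0, []) l).2.2) :=
  foldl_shift _ (fun g s0 s nx0 nx c => visitB_hstep n m g s0 s nx0 nx c) l g s nx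

-- A's fold over the four moves is visitB's fold with the S-update abstracted into addAt
theorem foldl_AB (n m : Int) (i : Nat) (u v : Int) (l : List (Int × Int)) :
    ∀ (g : List (List Int)) (S : List Int) (Q : List (Int × Int)),
    List.foldl (fun st mv => visitA n m i st (u + mv.1, v + mv.2)) (g, S, Q) l
      = ((List.foldl (fun st mv => visitB n m st (u + mv.1, v + mv.2)) (g, 0, []) l).1,
         addAt S i (List.foldl (fun st mv => visitB n m st (u + mv.1, v + mv.2)) (g, 0, []) l).2.1,
         Q ++ (List.foldl (fun st mv => visitB n m st (u + mv.1, v + mv.2)) (g, 0, []) l).2.2) := by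
  induction l with
  | nil => intro g S Q; simp [addAt_zero]
  | cons x l ih =>
    intro g S Q
    simp only [List.foldl_cons]
    by_cases h : 0 ≤ u + x.1 ∧ u + x.1 < n ∧ 0 ≤ v + x.2 ∧ v + x.2 < m ∧
        getC g (u + x.1) (v + x.2) ≠ 0
    · have eA : visitA n m i (g, S, Q) (u + x.1, v + x.2)
          = (setZ g (u + x.1) (v + x.2), addAt S i (getC g (u + x.1) (v + x.2)),
             Q ++ [(u + x.1, v + x.2)]) := by
        simp [visitA, addAt, h]
      have eB : visitB n m (g, 0, ([] : List (Int × Int))) (u + x.1, v + x.2)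
          = (setZ g (u + x.1) (v + x.2), getC g (u + x.1) (v + x.2),
             [(u + x.1, v + x.2)]) := by
        simp [visitB, h]
      rw [eA, eB, ih]
      rw [foldl_visitB_shift_mv n m u v l (setZ g (u + x.1) (v + x.2))
            (getC g (u + x.1) (v + x.2)) [(u + x.1, v + x.2)]]
      simp [addAt_addAt, List.append_assoc]
    · have eA : visitA n m i (g, S, Q) (u + x.1, v + x.2) = (g, S, Q) := by
        simp [visitA, h]
      have eB : visitB n m (g, 0, ([] : List (Int × Int))) (u + x.1, v + x.2)
          = (g, 0, []) := by
        simp [visitB, h]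
      rw [eA, eB, ih]

-- A's queue loop is bfsP with the running sum written into S at index i
theorem bfsA_eq (n m : Int) (i : Nat) :
    ∀ (N : Nat) (g : List (List Int)) (S : List Int) (Q : List (Int × Int)),
      gCount g + Q.length ≤ N →
      bfsA n m i g S Q = ((bfsP n m g Q).1, addAt S i (bfsP n m g Q).2) := by
  intro N
  induction N with
  | zero =>
    intro g S Q hQ
    have hq : Q = [] := List.eq_nil_of_length_eq_zero (by omega)
    subst hq
    rw [bfsA, bfsP, addAt_zero]
  | succ N ih =>
    intro g S Q hQ
    match Q with
    | [] => rw [bfsA, bfsP, addAt_zero]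
    | (u, v) :: rest =>
      rw [bfsA, bfsP]
      dsimp only
      rw [foldl_AB n m i u v movesA g S rest]
      rw [foldl_visitB_shift_mv n m u v movesA g 0 rest]
      dsimp only
      have hm := foldl_visitB_measure' n m u v movesA (g, 0, [])
      dsimp only at hm
      have hrec := ih
        (List.foldl (fun st mv => visitB n m st (u + mv.1, v + mv.2)) (g, 0, []) movesA).1
        (addAt S i (List.foldl (fun st mv => visitB n m st (u + mv.1, v + mv.2)) (g, 0, []) movesA).2.1)
        (rest ++ (List.foldl (fun st mv => visitB n m st (u + mv.1, v + mv.2)) (g, 0, []) movesA).2.2)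
        (by simp only [List.length_nil] at hm
            simp only [List.length_append, List.length_cons] at hQ ⊢
            omega)
      rw [hrec]
      rw [addAt_addAt]
      simp [zero_add]

-- A's fold over the move offsets is the plain fold over the neighbour list nbrsA
theorem moves_fold_eq (n m u v : Int) (st : List (List Int) × Int × List (Int × Int)) :
    List.foldl (fun st mv => visitB n m st (u + mv.1, v + mv.2)) st movesA
      = List.foldl (visitB n m) st (nbrsA (u, v)) := by
  simp [movesA, nbrsA, List.foldl, show u + (-1 : Int) = u - 1 from by ring,
    show v + (-1 : Int) = v - 1 from by ring]

-- touching a block L with visitB equals running the canonical machine on L,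
-- with the untouched neighbours of the newly queued cells deferred behind M
theorem procD_foldA (n m : Int) : ∀ (L : List (Int × Int)) (g : List (List Int))
    (M : List (Int × Int)),
    procD n m g (L ++ M)
      = ((List.foldl (visitB n m) (g, 0, []) L).2.1
          + (procD n m (List.foldl (visitB n m) (g, 0, []) L).1
              (M ++ (List.foldl (visitB n m) (g, 0, []) L).2.2.flatMap nbrsA)).1,
         (procD n m (List.foldl (visitB n m) (g, 0, []) L).1
              (M ++ (List.foldl (visitB n m) (g, 0, []) L).2.2.flatMap nbrsA)).2) := by
  intro L
  induction L with
  | nil => intro g M; simp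
  | cons c L' ih =>
    intro g M
    by_cases hc : 0 ≤ c.1 ∧ c.1 < n ∧ 0 ≤ c.2 ∧ c.2 < m ∧ getC g c.1 c.2 ≠ 0
    · have eB : visitB n m (g, 0, ([] : List (Int × Int))) c
          = (setZ g c.1 c.2, getC g c.1 c.2, [c]) := by
        simp [visitB, hc]
      have hperm : (nbrsB c ++ (L' ++ M)).Perm (L' ++ (M ++ nbrsA c)) := by
        refine ((nbrsB_perm c).append_right (L' ++ M)).trans ?_
        refine (List.perm_append_comm).trans ?_
        rw [List.append_assoc]
      rw [List.cons_append, procD_live n m g c (L' ++ M) hc,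
          procD_perm n m (setZ g c.1 c.2) _ _ hperm,
          ih (setZ g c.1 c.2) (M ++ nbrsA c)]
      simp only [List.foldl_cons, eB]
      rw [foldl_visitB_shift_id n m L' (setZ g c.1 c.2) (getC g c.1 c.2) [c]]
      dsimp only
      simp only [List.singleton_append, List.flatMap_cons, List.append_assoc, add_assoc]
    · have eB : visitB n m (g, 0, ([] : List (Int × Int))) c = (g, 0, []) := by
        simp [visitB, hc]
      rw [List.cons_append, procD_dead n m g c (L' ++ M) hc]
      simp only [List.foldl_cons, eB]
      exact ih g M

-- A's queue loop computes the canonical machine on the queued cells' neighbours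
theorem bfsP_eq_procD (n m : Int) : ∀ (N : Nat) (g : List (List Int)) (Q : List (Int × Int)),
    gCount g + Q.length ≤ N →
    bfsP n m g Q = ((procD n m g (Q.flatMap nbrsA)).2, (procD n m g (Q.flatMap nbrsA)).1) := by
  intro N
  induction N with
  | zero =>
    intro g Q hQ
    have hq : Q = [] := List.eq_nil_of_length_eq_zero (by omega)
    subst hq
    rw [bfsP]
    simp [procD_nil]
  | succ N ih =>
    intro g Q hQ
    match Q with
    | [] => rw [bfsP]; simp [procD_nil]
    | (u, v) :: rest =>
      rw [bfsP]
      rw [foldl_visitB_shift_mv n m u v movesA g 0 rest]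
      rw [moves_fold_eq n m u v (g, 0, [])]
      have hm := foldl_visitB_measure n m (nbrsA (u, v)) (g, 0, [])
      dsimp only at hm
      have hrec := ih (List.foldl (visitB n m) (g, 0, []) (nbrsA (u, v))).1
        (rest ++ (List.foldl (visitB n m) (g, 0, []) (nbrsA (u, v))).2.2)
        (by simp only [List.length_nil, List.length_append, List.length_cons] at hm hQ ⊢
            omega)
      rw [hrec]
      have hA := procD_foldA n m (nbrsA (u, v)) g (rest.flatMap nbrsA)
      rw [show ((u, v) :: rest).flatMap nbrsA = nbrsA (u, v) ++ rest.flatMap nbrsA from by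
            simp]
      rw [hA, List.flatMap_append]
      simp [zero_add]

-- B's stack loop computes the canonical machine plus its accumulator
theorem dfsB_eq (n m : Int) : ∀ (N : Nat) (g : List (List Int)) (t : Int)
    (W : List (Int × Int)), 5 * gCount g + W.length ≤ N →
    dfsB n m g t W = (t + (procD n m g W).1, (procD n m g W).2) := by
  intro N
  induction N with
  | zero =>
    intro g t W hW
    have hq : W = [] := List.eq_nil_of_length_eq_zero (by omega)
    subst hq
    rw [dfsB, procD_nil]
    simp
  | succ N ih =>
    intro g t W hW
    match W with
    | [] => rw [dfsB, procD_nil]; simp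
    | (a, b) :: rest =>
      rw [dfsB]
      by_cases h : 0 ≤ a ∧ a < n ∧ 0 ≤ b ∧ b < m ∧ getC g a b ≠ 0
      · rw [if_pos h]
        have hcount := gCount_setZ g a b h.2.2.2.2
        have e : (a, b - 1) :: (a, b + 1) :: (a + 1, b) :: (a - 1, b) :: rest
            = nbrsB (a, b) ++ rest := rfl
        rw [e, ih (setZ g a b) (t + getC g a b) (nbrsB (a, b) ++ rest)
          (by simp only [List.length_append, List.length_cons, nbrsB, List.length] at hW ⊢
              omega)]
        rw [procD_live n m g (a, b) rest h]
        dsimp only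
        congr 1
        ring
      · rw [if_neg h]
        rw [ih g t rest (by simp only [List.length_cons] at hW; omega)]
        rw [procD_dead n m g (a, b) rest h]

theorem procD_length (n m : Int) : ∀ (N : Nat) (g : List (List Int))
    (W : List (Int × Int)), 5 * gCount g + W.length ≤ N →
    ((procD n m g W).2).length = g.length := by
  intro N
  induction N with
  | zero =>
    intro g W hW
    have hq : W = [] := List.eq_nil_of_length_eq_zero (by omega)
    subst hq
    rw [procD_nil]
  | succ N ih =>
    intro g W hW
    match W with
    | [] => rw [procD_nil]
    | c :: rest =>
      by_cases h : liveP n m g c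
      · rw [procD_live n m g c rest h]
        have hcount := gCount_setZ g c.1 c.2 h.2.2.2.2
        dsimp only
        rw [ih (setZ g c.1 c.2) (nbrsB c ++ rest)
          (by simp only [List.length_append, List.length_cons, nbrsB, List.length] at hW ⊢
              omega)]
        exact setZ_length g c.1 c.2
      · rw [procD_dead n m g c rest h]
        exact ih g rest (by simp only [List.length_cons] at hW; omega)

-- the two `for i in range(m)` loops, related position by position
theorem outer_loop (nN mN : Nat) : ∀ (cnt k : Nat) (g : List (List Int)) (Sb : List Int),
    Sb.length = k → g.length = nN → k + cnt ≤ mN →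
    (List.range' k cnt).foldl (aLoopBody (nN : Int) (mN : Int)) (g, Sb ++ List.replicate cnt 0)
      = (List.range' k cnt).foldl (bLoopBody (nN : Int) (mN : Int)) (g, Sb) := by
  intro cnt
  induction cnt with
  | zero => intro k g Sb hk hg hkm; simp
  | succ cnt ih =>
    intro k g Sb hk hg hkm
    subst hk
    rw [List.range'_succ]
    simp only [List.foldl_cons, List.replicate_succ]
    by_cases hc : getC g 0 (Sb.length : Int) ≠ 0
    · -- live top cell: both sides flood the same component
      have hgne : 0 < g.length := by
        rcases g with _ | ⟨r, g'⟩
        · simp [getC, List.getD] at hc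
        · simp
      have hlive : liveP (nN : Int) (mN : Int) g ((0 : Int), (Sb.length : Int)) := by
        refine ⟨le_refl 0, ?_, ?_, ?_, hc⟩
        · dsimp only; omega
        · dsimp only; omega
        · dsimp only
          have : Sb.length < mN := by omega
          exact_mod_cast this
      set v := getC g 0 (Sb.length : Int) with hv
      set g0 := setZ g 0 (Sb.length : Int) with hg0
      set P := procD (nN : Int) (mN : Int) g0 (nbrsA ((0 : Int), (Sb.length : Int))) with hP
      have hcount := gCount_setZ g 0 (Sb.length : Int) hc
      -- A's step
      have h2 := addAt_append_cons Sb (List.replicate cnt 0) 0 v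
      unfold addAt at h2
      have eA : aLoopBody (nN : Int) (mN : Int) (g, Sb ++ 0 :: List.replicate cnt 0) Sb.length
          = bfsA (nN : Int) (mN : Int) Sb.length g0
              (Sb ++ (0 + v) :: List.replicate cnt 0) [((0 : Int), (Sb.length : Int))] := by
        simp only [aLoopBody]
        rw [if_pos hc, h2]
      have ebfs : bfsP (nN : Int) (mN : Int) g0 [((0 : Int), (Sb.length : Int))]
          = (P.2, P.1) := by
        rw [bfsP_eq_procD (nN : Int) (mN : Int) (gCount g0 + 1) g0 _ (by simp)]
        simp [hP]
      have eA2 : aLoopBody (nN : Int) (mN : Int) (g, Sb ++ 0 :: List.replicate cnt 0) Sb.length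
          = (P.2, Sb ++ (0 + v + P.1) :: List.replicate cnt 0) := by
        rw [eA, bfsA_eq (nN : Int) (mN : Int) Sb.length (gCount g0 + 1) g0 _ _ (by simp),
            ebfs, addAt_append_cons]
      -- B's step
      have eproc : procD (nN : Int) (mN : Int) g [((0 : Int), (Sb.length : Int))]
          = (v + P.1, P.2) := by
        rw [procD_live (nN : Int) (mN : Int) g ((0 : Int), (Sb.length : Int)) [] hlive]
        rw [List.append_nil]
        rw [procD_perm (nN : Int) (mN : Int) g0 _ _
          (nbrsB_perm ((0 : Int), (Sb.length : Int)))]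
      have eB : bLoopBody (nN : Int) (mN : Int) (g, Sb) Sb.length
          = (P.2, Sb ++ [0 + (v + P.1)]) := by
        simp only [bLoopBody]
        rw [dfsB_eq (nN : Int) (mN : Int) (5 * gCount g + 1) g 0 _ (by simp), eproc]
      rw [eA2, eB]
      have hlen : P.2.length = nN := by
        rw [hP, procD_length (nN : Int) (mN : Int) (5 * gCount g0 + 4) g0 _
          (by simp [nbrsA]), hg0, setZ_length]
        exact hg
      rw [show Sb ++ (0 + v + P.1) :: List.replicate cnt 0
          = (Sb ++ [0 + (v + P.1)]) ++ List.replicate cnt 0 from by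
            rw [List.append_assoc, List.singleton_append, add_assoc]]
      exact ih (Sb.length + 1) P.2 (Sb ++ [0 + (v + P.1)]) (by simp) hlen (by omega)
    · -- dead top cell: both sides record 0 and leave the grid alone
      have hdead : ¬ liveP (nN : Int) (mN : Int) g ((0 : Int), (Sb.length : Int)) := by
        intro hl
        exact hc hl.2.2.2.2
      have eA : aLoopBody (nN : Int) (mN : Int) (g, Sb ++ 0 :: List.replicate cnt 0) Sb.length
          = (g, Sb ++ 0 :: List.replicate cnt 0) := by
        simp only [aLoopBody]
        rw [if_neg hc]
      have eB : bLoopBody (nN : Int) (mN : Int) (g, Sb) Sb.length = (g, Sb ++ [0]) := by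
        simp only [bLoopBody]
        rw [dfsB_eq (nN : Int) (mN : Int) (5 * gCount g + 1) g 0 _ (by simp),
            procD_dead (nN : Int) (mN : Int) g ((0 : Int), (Sb.length : Int)) [] hdead,
            procD_nil]
        simp
      rw [eA, eB]
      rw [show Sb ++ (0 : Int) :: List.replicate cnt 0
          = (Sb ++ [0]) ++ List.replicate cnt 0 from by
            rw [List.append_assoc, List.singleton_append]]
      exact ih (Sb.length + 1) g (Sb ++ [0]) (by simp) hg (by omega)

-- ===== VERDICT (by name: the statement is the Claim_ definition above) =====
theorem sum_stains_spec : Claim_equal_sum_stains := by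
  intro T _hdom _hpre
  show sum_stains T = sum_stains_alt T
  unfold sum_stains sum_stains_alt
  rw [List.range_eq_range']
  rw [show (T, List.replicate (T.getD 0 []).length (0 : Int))
      = (T, ([] : List Int) ++ List.replicate (T.getD 0 []).length 0) from by simp]
  rw [outer_loop T.length (T.getD 0 []).length (T.getD 0 []).length 0 T [] rfl rfl
    (by omega)]
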